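-- pv_equiv track=rewrite | github.com/williamconvertino/gd-metamodeling | src/datasets/datasets.py | merge_eot_entries
-- ===== SOURCE A (Python) =====
-- def merge_eot_entries(example):
--     new_text = []
--     buffer = []
--
--     for text in example['text']:
--         buffer.append(text)
--         if '<|endoftext|>' in text:
--             new_text.append('\n'.join(buffer))
--             buffer = []
--
--     return {'text': new_text}
-- ===== SOURCE B (Python) =====
-- def merge_eot_entries(example):
--     texts = example['text']
--     groups = []
--     while True:
--         i = next((k for k, t in enumerate(texts) if '<|endoftext|>' in t), None)
--         if i is None:
--             break
--         groups.append('\n'.join(texts[:i + 1]))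
--         texts = texts[i + 1:]
--     return {'text': groups}
-- ===== Notes on version B (the rewrite author's own statement) =====
-- stated objective: alternative
-- what changed: Replaced the single-pass buffer accumulator with a find-first-boundary-and-slice loop: repeatedly locate the next entry containing '<|endoftext|>', join the slice up to and including it, and continue on the remainder.
import Mathlib
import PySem

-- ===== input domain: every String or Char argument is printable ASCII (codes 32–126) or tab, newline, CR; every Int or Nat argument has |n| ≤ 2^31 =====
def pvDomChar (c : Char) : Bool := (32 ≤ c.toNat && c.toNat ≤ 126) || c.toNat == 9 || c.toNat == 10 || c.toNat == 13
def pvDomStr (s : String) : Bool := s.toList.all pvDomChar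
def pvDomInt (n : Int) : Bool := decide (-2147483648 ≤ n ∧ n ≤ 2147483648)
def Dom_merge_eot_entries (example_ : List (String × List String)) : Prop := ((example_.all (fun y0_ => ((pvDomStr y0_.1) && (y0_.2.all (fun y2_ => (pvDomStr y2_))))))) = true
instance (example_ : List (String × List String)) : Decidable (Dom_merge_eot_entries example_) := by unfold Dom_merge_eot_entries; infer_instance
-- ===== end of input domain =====

-- B replaces A's single-pass buffer accumulator with a find-first-boundary-and-slice loop (alternative decomposition, same cost class); return-value equivalence only.

-- shared helper: example['text'] as first-match association-list lookup
def pvLookupText (d : List (String × List String)) : Option (List String) :=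
  match d with
  | [] => none
  | (k, v) :: rest => if k = "text" then some v else pvLookupText rest

-- ===== PORT A =====
-- the loop body: buffer.append(text); if '<|endoftext|>' in text: new_text.append('\n'.join(buffer)); buffer = []
def mergeStepA (st : List String × List String) (text : String) : List String × List String :=
  let buf := st.2 ++ [text]
  if PySem.Str.isIn "<|endoftext|>" text then (st.1 ++ [PySem.Str.join "\n" buf], [])
  else (st.1, buf)

def merge_eot_entries (example_ : List (String × List String)) : List (String × List String) :=
  match pvLookupText example_ with
  | none => []   -- unreachable under Pre_ (Python raises KeyError)
  | some texts =>
    let st := texts.foldl mergeStepA ([], [])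
    [("text", st.1)]

-- ===== PORT B =====
-- while True: find first entry containing the marker; emit the joined slice through it; continue on the rest
def mergeGoB (texts : List String) : List String :=
  match h : texts.findIdx? (fun t => PySem.Str.isIn "<|endoftext|>" t) with
  | none => []
  | some i =>
    PySem.Str.join "\n" (texts.take (i + 1)) :: mergeGoB (texts.drop (i + 1))
termination_by texts.length
decreasing_by
  have hi := List.findIdx?_eq_some_iff_findIdx_eq.mp h
  simp [List.length_drop]; omega

def merge_eot_entries_alt (example_ : List (String × List String)) : List (String × List String) :=
  match pvLookupText example_ with
  | none => []
  | some texts => [("text", mergeGoB texts)]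

-- ===== PRECONDITION & SPEC =====
-- Pre_ excludes exactly the inputs without a "text" key, on which Python A raises KeyError.
def Pre_merge_eot_entries (example_ : List (String × List String)) : Prop :=
  "text" ∈ example_.map Prod.fst
instance (example_ : List (String × List String)) : Decidable (Pre_merge_eot_entries example_) := by unfold Pre_merge_eot_entries; infer_instance

def pvWitness_merge_eot_entries : (List (String × List String)) := [("text", ["a", "b<|endoftext|>", "c"])]

def Spec_merge_eot_entries (example_ : List (String × List String)) (out : List (String × List String)) : Prop := out = merge_eot_entries_alt example_
instance (example_ : List (String × List String)) (out : List (String × List String)) : Decidable (Spec_merge_eot_entries example_ out) := by unfold Spec_merge_eot_entries; infer_instance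

-- ===== CLAIM (what is proved, stated in full; the proofs are below) =====
def Claim_equal_merge_eot_entries : Prop := ∀ (example_ : List (String × List String)), Dom_merge_eot_entries example_ → Pre_merge_eot_entries example_ → Spec_merge_eot_entries example_ (merge_eot_entries example_)

-- ===== LEMMAS AND PROOFS =====

-- bridging recursion: A's buffer loop, buffer made explicit
def mergeAux (buf : List String) : List String → List String
  | [] => []
  | t :: ts =>
    if PySem.Str.isIn "<|endoftext|>" t then
      PySem.Str.join "\n" (buf ++ [t]) :: mergeAux [] ts
    else mergeAux (buf ++ [t]) ts

theorem foldl_mergeStepA (ts : List String) :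
    ∀ (acc buf : List String), (ts.foldl mergeStepA (acc, buf)).1 = acc ++ mergeAux buf ts := by
  induction ts with
  | nil => intro acc buf; simp [mergeAux]
  | cons t ts ih =>
    intro acc buf
    rw [List.foldl_cons, ih]
    simp only [mergeStepA, mergeAux]
    split_ifs with hp <;> simp

theorem mergeAux_findIdx (ts : List String) (buf : List String) :
    mergeAux buf ts =
      (match ts.findIdx? (fun t => PySem.Str.isIn "<|endoftext|>" t) with
       | none => []
       | some i => PySem.Str.join "\n" (buf ++ ts.take (i + 1)) :: mergeAux [] (ts.drop (i + 1))) := by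
  induction ts generalizing buf with
  | nil => simp [mergeAux]
  | cons t ts ih =>
    simp only [mergeAux, List.findIdx?_cons]
    split_ifs with hp
    · simp
    · rw [ih (buf ++ [t])]
      cases hf : ts.findIdx? (fun t => PySem.Str.isIn "<|endoftext|>" t) with
      | none => simp
      | some i => simp

theorem mergeGoB_eq_mergeAux (ts : List String) : mergeGoB ts = mergeAux [] ts := by
  induction ts using mergeGoB.induct with
  | case1 ts h =>
    rw [mergeGoB]
    split
    · rw [mergeAux_findIdx ts [], h]
    · next i heq => rw [h] at heq; cases heq
  | case2 ts i h ih =>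
    rw [mergeGoB]
    split
    · next heq => rw [h] at heq; cases heq
    · next j heq =>
      rw [h] at heq
      cases heq
      rw [mergeAux_findIdx ts [], h, ih]
      simp

-- ===== VERDICT (by name: the statement is the Claim_ definition above) =====
theorem merge_eot_entries_spec : Claim_equal_merge_eot_entries := by
  intro example_ _hdom _hpre
  unfold Spec_merge_eot_entries merge_eot_entries merge_eot_entries_alt
  cases h : pvLookupText example_ with
  | none => rfl
  | some texts =>
    simp only [mergeGoB_eq_mergeAux, foldl_mergeStepA]
    rfl
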